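-- pv_equiv track=rewrite | github.com/sjparle/reeltug3 | preview_handler.py | _find_nearest_gui_label
-- ===== SOURCE A (Python) =====
-- def _find_nearest_gui_label(gui_frame_data, expected_prefix, target_frame):
--     if target_frame is None:
--         return "", None
--     best_label = ""
--     best_frame = None
--     best_distance = None
--     for label_id, frame_key in gui_frame_data.items():
--         if not str(frame_key).startswith(expected_prefix):
--             continue
--         try:
--             frame_no = int(str(frame_key).replace(expected_prefix, ""))
--         except (TypeError, ValueError):
--             continue
--         distance = abs(frame_no - target_frame)
--         if best_distance is None or distance < best_distance:
--             best_distance = distance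
--             best_label = label_id
--             best_frame = frame_no
--     return best_label, best_frame
-- ===== SOURCE B (Python) =====
-- def _parse_frame(frame_key, expected_prefix):
--     s = str(frame_key)
--     if not s.startswith(expected_prefix):
--         return None
--     try:
--         return int(s.replace(expected_prefix, ""))
--     except (TypeError, ValueError):
--         return None
--
--
-- def _find_nearest_gui_label(gui_frame_data, expected_prefix, target_frame):
--     if target_frame is None:
--         return "", None
--     # stage 1: parse every matching key into a (label, frame_no) candidate
--     candidates = [(label_id, f)
--                   for label_id, frame_key in gui_frame_data.items()
--                   for f in [_parse_frame(frame_key, expected_prefix)]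
--                   if f is not None]
--     if not candidates:
--         return "", None
--     # stage 2: the best achievable distance, as a plain number
--     best = min(abs(f - target_frame) for _, f in candidates)
--     # stage 3: first candidate achieving it (matches A's strict-less tie-break)
--     for label_id, f in candidates:
--         if abs(f - target_frame) == best:
--             return label_id, f
-- ===== Notes on version B (the rewrite author's own statement) =====
-- stated objective: alternative
-- what changed: Replaces A's one-pass running-best loop holding three state variables with a staged pipeline: parse all keys into candidates, compute the minimum distance as a bare number, then linearly search for the first candidate attaining it.
import Mathlib
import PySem

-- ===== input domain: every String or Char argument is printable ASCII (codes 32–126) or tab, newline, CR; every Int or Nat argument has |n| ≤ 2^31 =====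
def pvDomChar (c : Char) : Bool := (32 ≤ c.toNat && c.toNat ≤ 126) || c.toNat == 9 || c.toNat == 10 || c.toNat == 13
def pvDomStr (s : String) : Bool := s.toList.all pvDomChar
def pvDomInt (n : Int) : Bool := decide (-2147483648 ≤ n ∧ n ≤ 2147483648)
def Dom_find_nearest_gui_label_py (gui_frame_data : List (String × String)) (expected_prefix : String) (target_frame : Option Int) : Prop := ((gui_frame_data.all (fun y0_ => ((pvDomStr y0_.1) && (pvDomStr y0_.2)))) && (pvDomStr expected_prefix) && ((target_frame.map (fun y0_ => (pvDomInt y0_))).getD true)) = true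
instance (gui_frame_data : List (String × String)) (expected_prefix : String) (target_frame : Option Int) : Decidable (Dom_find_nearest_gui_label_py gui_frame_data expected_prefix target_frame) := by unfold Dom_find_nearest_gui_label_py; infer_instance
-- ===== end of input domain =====

-- B replaces A's running-best loop by a staged pipeline: collect candidates, compute the minimum distance, then find the first candidate attaining it (alternative decomposition, same cost).


-- ===== PORT A =====
-- A's loop body as a named helper (state = (best_label, best_frame, best_distance))
def pvStepA (expected_prefix : String) (t : Int) (st : String × Option Int × Option Int)
    (p : String × String) : String × Option Int × Option Int :=
  if ¬ (PySem.Str.startswith p.2 expected_prefix) then st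
  else
    match PySem.Int.ofStr? (PySem.Str.replace p.2 expected_prefix "") with
    | none => st
    | some frame_no =>
      let distance := |frame_no - t|
      match st.2.2 with
      | none => (p.1, some frame_no, some distance)
      | some bd =>
        if distance < bd then (p.1, some frame_no, some distance) else st

def find_nearest_gui_label_py (gui_frame_data : List (String × String)) (expected_prefix : String) (target_frame : Option Int) : String × Option Int :=
  match target_frame with
  | none => ("", none)
  | some t =>
    let st := gui_frame_data.foldl (pvStepA expected_prefix t) ("", none, none)
    (st.1, st.2.1)

-- ===== PORT B =====
-- B, stage 1 helper: parse one key into a frame number (None if it does not match)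
def pvParseFrame (frame_key : String) (expected_prefix : String) : Option Int :=
  if ¬ (PySem.Str.startswith frame_key expected_prefix) then none
  else PySem.Int.ofStr? (PySem.Str.replace frame_key expected_prefix "")

def find_nearest_gui_label_py_alt (gui_frame_data : List (String × String)) (expected_prefix : String) (target_frame : Option Int) : String × Option Int :=
  match target_frame with
  | none => ("", none)
  | some t =>
    -- stage 1: candidates = [(label, f) | f = parse(key) ≠ None]
    let candidates := gui_frame_data.filterMap
      (fun p => (pvParseFrame p.2 expected_prefix).map (fun f => (p.1, f)))
    match candidates with
    | [] => ("", none)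
    | _ :: _ =>
      -- stage 2: best achievable distance (min of a nonempty generator)
      match PySem.List.min? (candidates.map (fun c => |c.2 - t|)) (fun d => d) with
      | none => ("", none)   -- unreachable: candidates nonempty
      | some best =>
        -- stage 3: first candidate attaining it
        match candidates.find? (fun c => decide (|c.2 - t| = best)) with
        | some c => (c.1, some c.2)
        | none => ("", none) -- unreachable: the minimum is attained

-- ===== PRECONDITION & SPEC =====
def Spec_find_nearest_gui_label_py (gui_frame_data : List (String × String)) (expected_prefix : String) (target_frame : Option Int) (out : String × Option Int) : Prop := out = find_nearest_gui_label_py_alt gui_frame_data expected_prefix target_frame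
instance (gui_frame_data : List (String × String)) (expected_prefix : String) (target_frame : Option Int) (out : String × Option Int) : Decidable (Spec_find_nearest_gui_label_py gui_frame_data expected_prefix target_frame out) := by unfold Spec_find_nearest_gui_label_py; infer_instance

-- ===== CLAIM (what is proved, stated in full; the proofs are below) =====
def Claim_equal_find_nearest_gui_label_py : Prop := ∀ (gui_frame_data : List (String × String)) (expected_prefix : String) (target_frame : Option Int), Dom_find_nearest_gui_label_py gui_frame_data expected_prefix target_frame → Spec_find_nearest_gui_label_py gui_frame_data expected_prefix target_frame (find_nearest_gui_label_py gui_frame_data expected_prefix target_frame)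

-- ===== LEMMAS AND PROOFS =====

-- A's loop state induced by the current best candidate
def pvStateOf (t : Int) (acc : Option (String × Int)) : String × Option Int × Option Int :=
  match acc with
  | none => ("", none, none)
  | some c => (c.1, some c.2, some |c.2 - t|)

-- A's running-best step on the candidate representation
def pvMinStep (t : Int) (acc : Option (String × Int)) (c : String × Int) : Option (String × Int) :=
  match acc with
  | none => some c
  | some m => if |c.2 - t| < |m.2 - t| then some c else some m

-- A's fold over the raw pairs = a running-best fold over B's candidate list
theorem pv_loopA (expected_prefix : String) (t : Int) (xs : List (String × String))
    (acc : Option (String × Int)) :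
    xs.foldl (pvStepA expected_prefix t) (pvStateOf t acc)
    = pvStateOf t ((xs.filterMap
        (fun p => (pvParseFrame p.2 expected_prefix).map (fun f => (p.1, f)))).foldl (pvMinStep t) acc) := by
  induction xs generalizing acc with
  | nil => rfl
  | cons hd tl ih =>
    simp only [List.foldl_cons, List.filterMap_cons]
    by_cases hs : PySem.Str.startswith hd.2 expected_prefix
    · cases hn : PySem.Int.ofStr? (PySem.Str.replace hd.2 expected_prefix "") with
      | none =>
        simp only [pvStepA, pvParseFrame, hs, hn, not_true, ite_false, Option.map_none]
        exact ih acc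
      | some n =>
        simp only [pvStepA, pvParseFrame, hs, hn, not_true, ite_false, Option.map_some]
        cases acc with
        | none =>
          simp only [List.foldl_cons, pvMinStep, pvStateOf]
          exact ih (some (hd.1, n))
        | some m =>
          simp only [List.foldl_cons, pvMinStep, pvStateOf]
          by_cases hlt : |n - t| < |m.2 - t|
          · simp only [hlt, if_true]
            exact ih (some (hd.1, n))
          · simp only [hlt, if_false]
            exact ih (some m)
    · simp only [pvStepA, pvParseFrame, hs]
      exact ih acc

-- the running minimum of a fold never exceeds its seed
theorem pv_foldl_min_le (l : List Int) (a : Int) : l.foldl min a ≤ a := by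
  induction l generalizing a with
  | nil => simp
  | cons x xs ih =>
    simp only [List.foldl_cons]
    exact le_trans (ih (min a x)) (min_le_left a x)

-- the running minimum changes only on strict decrease, so the final element is the
-- FIRST candidate attaining the overall minimum distance
theorem pv_fold_min_find (t : Int) (cs : List (String × Int)) (c0 : String × Int) :
    cs.foldl (pvMinStep t) (some c0)
    = (c0 :: cs).find? (fun c =>
        decide (|c.2 - t| = (cs.map (fun c => |c.2 - t|)).foldl min |c0.2 - t|)) := by
  induction cs generalizing c0 with
  | nil => simp [List.find?]
  | cons hd tl ih =>
    simp only [List.foldl_cons, List.map_cons, pvMinStep]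
    by_cases hlt : |hd.2 - t| < |c0.2 - t|
    · simp only [hlt, if_true]
      rw [ih hd]
      have hmin : min |c0.2 - t| |hd.2 - t| = |hd.2 - t| := min_eq_right (le_of_lt hlt)
      simp only [hmin]
      have hle := pv_foldl_min_le (tl.map (fun c => |c.2 - t|)) |hd.2 - t|
      have hne : (decide (|c0.2 - t| = (tl.map (fun c => |c.2 - t|)).foldl min |hd.2 - t|)) = false := by
        simp only [decide_eq_false_iff_not]
        intro h; omega
      simp only [List.find?_cons, hne]
    · simp only [hlt, if_false]
      rw [ih c0]
      have hmin : min |c0.2 - t| |hd.2 - t| = |c0.2 - t| := min_eq_left (by omega)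
      simp only [hmin]
      by_cases h0 : |c0.2 - t| = (tl.map (fun c => |c.2 - t|)).foldl min |c0.2 - t|
      · have h0t : (decide (|c0.2 - t| = (tl.map (fun c => |c.2 - t|)).foldl min |c0.2 - t|)) = true :=
          decide_eq_true h0
        simp only [List.find?_cons, h0t]
      · have h0f : (decide (|c0.2 - t| = (tl.map (fun c => |c.2 - t|)).foldl min |c0.2 - t|)) = false := by
          simp only [decide_eq_false_iff_not]; exact h0
        have hle := pv_foldl_min_le (tl.map (fun c => |c.2 - t|)) |c0.2 - t|
        have hhd : (decide (|hd.2 - t| = (tl.map (fun c => |c.2 - t|)).foldl min |c0.2 - t|)) = false := by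
          simp only [decide_eq_false_iff_not]; intro h; omega
        simp only [List.find?_cons, h0f, hhd]

-- ===== VERDICT (by name: the statement is the Claim_ definition above) =====
theorem find_nearest_gui_label_py_spec : Claim_equal_find_nearest_gui_label_py := by
  intro gui_frame_data expected_prefix target_frame _
  unfold Spec_find_nearest_gui_label_py
  cases target_frame with
  | none => rfl
  | some t =>
    simp only [find_nearest_gui_label_py, find_nearest_gui_label_py_alt]
    rw [show (("", none, none) : String × Option Int × Option Int) = pvStateOf t none from rfl,
        pv_loopA expected_prefix t gui_frame_data none]
    cases hc : gui_frame_data.filterMap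
        (fun p => (pvParseFrame p.2 expected_prefix).map (fun f => (p.1, f))) with
    | nil => rfl
    | cons c0 rest =>
      simp only [List.foldl_cons, List.map_cons, pvMinStep, PySem.List.min?_id_cons]
      rw [pv_fold_min_find t rest c0]
      cases hf : (c0 :: rest).find? (fun c =>
          decide (|c.2 - t| = (rest.map (fun c => |c.2 - t|)).foldl min |c0.2 - t|)) with
      | none => rfl
      | some c => rfl
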